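-- pv_equiv track=rewrite | github.com/ykmyk/Projects-in-university-years | courseAssignments/IntroductionToMachineLearning/07/isnt_it_ironic.py | augment_texts
-- ===== SOURCE A (Python) =====
-- def has_inner_uppercase(text: str) -> bool:
--     """Return True if any token contains an uppercase letter
--     after its first character."""
--     for token in text.split():
--         # Skip empty tokens just in case
--         if len(token) <= 1:
--             continue
--         # Check characters from index 1 onwards
--         for ch in token[1:]:
--             if ch.isupper():
--                 return True
--     return False
--
-- def is_shouty(text, min_ratio: float = 0.3):
--     """True if uppercase letters make up at least min_ratio of all letters."""
--     letters = [ch for ch in text if ch.isalpha()]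
--     if not letters:
--         return False
--     upper_count = sum(1 for ch in letters if ch.isupper())
--     return (upper_count / len(letters)) >= min_ratio
--
-- def many_exclamations(text, threshold: int = 2):
--     return text.count("!") >= threshold
--
-- def many_questions(text, threshold: int = 2):
--     return text.count("?") >= threshold
--
-- def augment_texts(texts):
--     result = []
--     for t in texts:
--         markers = []
--
--         # Inner uppercase
--         markers.append("<INNER_CAP_1>" if has_inner_uppercase(t) else "<INNER_CAP_0>")
--
--         # Shoutiness
--         if is_shouty(t):
--             markers.append("<SHOUTY>")
--
--         # Multiple exclamation/question marks
--         if many_exclamations(t):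
--             markers.append("<MANY_EXCL>")
--         if many_questions(t):
--             markers.append("<MANY_QUEST>")
--
--         if markers:
--             t = t + " " + " ".join(markers)
--
--         result.append(t)
--     return result
-- ===== SOURCE B (Python) =====
-- def augment_texts(texts):
--     # One fused character pass per text: token-position flag for inner caps,
--     # letter/upper counts for shoutiness (exact integer ratio test), and
--     # '!' / '?' counts -- replacing split() plus four separate scans.
--     def process(t):
--         in_word = False
--         inner_cap = False
--         letters = uppers = excl = quest = 0
--         for ch in t:
--             if ch.isspace():
--                 in_word = False
--             else:
--                 if in_word and ch.isupper():
--                     inner_cap = True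
--                 in_word = True
--             if ch.isalpha():
--                 letters += 1
--                 if ch.isupper():
--                     uppers += 1
--             if ch == "!":
--                 excl += 1
--             elif ch == "?":
--                 quest += 1
--         markers = ["<INNER_CAP_1>" if inner_cap else "<INNER_CAP_0>"]
--         if letters and 10 * uppers >= 3 * letters:
--             markers.append("<SHOUTY>")
--         if excl >= 2:
--             markers.append("<MANY_EXCL>")
--         if quest >= 2:
--             markers.append("<MANY_QUEST>")
--         return t + " " + " ".join(markers)
--
--     return [process(t) for t in texts]
-- ===== Notes on version B (the rewrite author's own statement) =====
-- stated objective: faster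
-- what changed: Each text is scanned in one fused character pass (token-start flag for inner capitals, letter/uppercase counters with an exact integer ratio test, '!'/'?' counters) instead of str.split() plus four separate scans.
import Mathlib
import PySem

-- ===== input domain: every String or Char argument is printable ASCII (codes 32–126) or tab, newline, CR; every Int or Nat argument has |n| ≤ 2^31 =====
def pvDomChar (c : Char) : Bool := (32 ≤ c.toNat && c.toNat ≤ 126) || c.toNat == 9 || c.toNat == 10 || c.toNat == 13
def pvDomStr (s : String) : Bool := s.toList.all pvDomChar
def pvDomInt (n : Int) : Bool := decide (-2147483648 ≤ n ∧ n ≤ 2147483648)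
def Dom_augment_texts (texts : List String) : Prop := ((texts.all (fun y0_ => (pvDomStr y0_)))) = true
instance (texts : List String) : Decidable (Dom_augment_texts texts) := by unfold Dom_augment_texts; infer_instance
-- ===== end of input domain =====

-- B fuses A's str.split() pass and four counting scans into one character pass per text
-- (alternative decomposition, same O(n) cost); return values only, no mutation involved.

-- ===== PORT A =====
-- has_inner_uppercase: loop over text.split(), early return True = List.any
def pvHasInnerUppercase (t : String) : Bool :=
  (PySem.Chars.split₀ t.toList).any (fun tok =>
    if tok.length ≤ 1 then false
    else (tok.drop 1).any PySem.Chars.isupper)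

-- is_shouty: the float test 'upper_count / len(letters) >= 0.3' is ported as the exact
-- rational comparison 10 * upper_count ≥ 3 * len(letters) (exact for all feasible lengths)
def pvIsShouty (t : String) : Bool :=
  let letters := t.toList.filter PySem.Chars.isalpha
  if letters.isEmpty then false
  else
    let upperCount : Int := (letters.countP PySem.Chars.isupper : Int)
    decide (10 * upperCount ≥ 3 * (letters.length : Int))

def pvManyExclamations (t : String) : Bool := decide (PySem.Chars.count t.toList ['!'] ≥ 2)

def pvManyQuestions (t : String) : Bool := decide (PySem.Chars.count t.toList ['?'] ≥ 2)

def augment_texts (texts : List String) : List String :=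
  texts.foldl (fun result t =>
    let markers : List (List Char) :=
      [if pvHasInnerUppercase t then "<INNER_CAP_1>".toList else "<INNER_CAP_0>".toList]
    let markers := if pvIsShouty t then markers ++ ["<SHOUTY>".toList] else markers
    let markers := if pvManyExclamations t then markers ++ ["<MANY_EXCL>".toList] else markers
    let markers := if pvManyQuestions t then markers ++ ["<MANY_QUEST>".toList] else markers
    let t' := if markers.isEmpty then t
              else String.ofList (t.toList ++ [' '] ++ PySem.Chars.join [' '] markers)
    result ++ [t']) []

-- ===== PORT B =====
structure PvScan where
  inw : Bool
  ic : Bool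
  letters : Int
  uppers : Int
  excl : Int
  quest : Int
deriving Repr, DecidableEq

def pvStep (st : PvScan) (ch : Char) : PvScan :=
  let st :=
    if PySem.Chars.isspace ch then { st with inw := false }
    else
      let st := if st.inw && PySem.Chars.isupper ch then { st with ic := true } else st
      { st with inw := true }
  let st :=
    if PySem.Chars.isalpha ch then
      let st := { st with letters := st.letters + 1 }
      if PySem.Chars.isupper ch then { st with uppers := st.uppers + 1 } else st
    else st
  if ch == '!' then { st with excl := st.excl + 1 }
  else if ch == '?' then { st with quest := st.quest + 1 }
  else st

def pvProcess (t : String) : String :=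
  let st := t.toList.foldl pvStep ⟨false, false, 0, 0, 0, 0⟩
  let markers : List (List Char) :=
    [if st.ic then "<INNER_CAP_1>".toList else "<INNER_CAP_0>".toList]
  let markers := if st.letters ≠ 0 ∧ 10 * st.uppers ≥ 3 * st.letters
                 then markers ++ ["<SHOUTY>".toList] else markers
  let markers := if st.excl ≥ 2 then markers ++ ["<MANY_EXCL>".toList] else markers
  let markers := if st.quest ≥ 2 then markers ++ ["<MANY_QUEST>".toList] else markers
  String.ofList (t.toList ++ [' '] ++ PySem.Chars.join [' '] markers)

def augment_texts_alt (texts : List String) : List String :=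
  texts.map pvProcess

-- ===== PRECONDITION & SPEC =====
def Spec_augment_texts (texts : List String) (out : List String) : Prop := out = augment_texts_alt texts
instance (texts : List String) (out : List String) : Decidable (Spec_augment_texts texts out) := by unfold Spec_augment_texts; infer_instance

-- ===== CLAIM (what is proved, stated in full; the proofs are below) =====
def Claim_equal_augment_texts : Prop := ∀ (texts : List String), Dom_augment_texts texts → Spec_augment_texts texts (augment_texts texts)

-- ===== LEMMAS AND PROOFS =====

-- the (in-word, inner-cap) component of B's scan, in isolation
def pvIcf (p : Bool × Bool) (c : Char) : Bool × Bool :=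
  if PySem.Chars.isspace c then (false, p.2) else (true, p.2 || (p.1 && PySem.Chars.isupper c))

-- inner-cap test on a reversed token prefix
def pvPc (cur : List Char) : Bool := (cur.reverse.drop 1).any PySem.Chars.isupper

def pvPtok (tok : List Char) : Bool := (tok.drop 1).any PySem.Chars.isupper

lemma pvPtok_guard (tok : List Char) :
    (if tok.length ≤ 1 then false else (tok.drop 1).any PySem.Chars.isupper) = pvPtok tok := by
  match tok with
  | [] => simp [pvPtok]
  | [a] => simp [pvPtok]
  | a :: b :: l => simp [pvPtok]

-- B's fused scan = the (in-word, inner-cap) pair plus four independent counts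
lemma pvScan_eq (s : List Char) (st : PvScan) :
    s.foldl pvStep st =
      ⟨(s.foldl pvIcf (st.inw, st.ic)).1, (s.foldl pvIcf (st.inw, st.ic)).2,
       st.letters + (s.countP PySem.Chars.isalpha : Int),
       st.uppers + (s.countP (fun c => PySem.Chars.isalpha c && PySem.Chars.isupper c) : Int),
       st.excl + (s.countP (· == '!') : Int),
       st.quest + (s.countP (fun c => !(c == '!') && (c == '?')) : Int)⟩ := by
  induction s generalizing st with
  | nil => simp
  | cons c rest ih =>
    rw [List.foldl_cons, List.foldl_cons, ih]
    have hstep : pvStep st c =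
        ⟨(pvIcf (st.inw, st.ic) c).1, (pvIcf (st.inw, st.ic) c).2,
         st.letters + (if PySem.Chars.isalpha c then 1 else 0),
         st.uppers + (if PySem.Chars.isalpha c && PySem.Chars.isupper c then 1 else 0),
         st.excl + (if c == '!' then 1 else 0),
         st.quest + (if !(c == '!') && (c == '?') then 1 else 0)⟩ := by
      simp only [pvStep, pvIcf]
      split_ifs <;> simp_all
    rw [hstep]
    simp only [List.countP_cons]
    congr 1 <;> push_cast <;> split_ifs <;> simp_all <;> omega

lemma pvPc_cons (c : Char) (cur : List Char) (h : cur ≠ []) :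
    pvPc (c :: cur) = (pvPc cur || PySem.Chars.isupper c) := by
  simp only [pvPc, List.reverse_cons]
  rw [List.drop_append_of_le_length (by simpa using List.length_pos_of_ne_nil (by simpa using h))]
  simp

lemma pvPtok_reverse (cur : List Char) : pvPtok cur.reverse = pvPc cur := rfl

-- A's split()-based inner-cap test = B's two-flag scan (invariant over split₀.go's state)
lemma pvIc_go (s cur : List Char) (acc : List (List Char)) :
    (PySem.Chars.split₀.go s cur acc).any pvPtok =
      (s.foldl pvIcf (!cur.isEmpty, acc.any pvPtok || pvPc cur)).2 := by
  induction s generalizing cur acc with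
  | nil =>
    rw [PySem.Chars.split₀.go]
    by_cases h : cur.isEmpty
    · have h' : cur = [] := List.isEmpty_iff.mp h
      simp [h', pvPc]
    · simp [h, pvPtok_reverse, Bool.or_comm]
  | cons c rest ih =>
    rw [PySem.Chars.split₀.go, List.foldl_cons]
    by_cases hs : PySem.Chars.isspace c
    · rw [if_pos hs]
      by_cases h : cur.isEmpty
      · have h' : cur = [] := List.isEmpty_iff.mp h
        rw [if_pos h, ih]
        simp [pvIcf, hs, h']
      · rw [if_neg h, ih]
        have hst : ((!(List.isEmpty ([] : List Char))), ((cur.reverse :: acc).any pvPtok || pvPc ([] : List Char))) =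
            pvIcf (!cur.isEmpty, acc.any pvPtok || pvPc cur) c := by
          simp [pvIcf, hs, pvPc, pvPtok_reverse, Bool.or_comm]
        rw [hst]
    · rw [if_neg hs, ih]
      have hst : ((!(c :: cur).isEmpty), (acc.any pvPtok || pvPc (c :: cur))) =
          pvIcf (!cur.isEmpty, acc.any pvPtok || pvPc cur) c := by
        rcases eq_or_ne cur [] with h' | h'
        · simp [pvIcf, hs, h', pvPc]
        · have hne : cur.isEmpty = false := by simp [h']
          simp [pvIcf, hs, pvPc_cons _ _ h', hne, Bool.or_assoc]
      rw [hst]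

lemma pvHasInner_eq (t : String) :
    pvHasInnerUppercase t = (t.toList.foldl pvIcf (false, false)).2 := by
  rw [pvHasInnerUppercase, PySem.Chars.split₀]
  have h1 : ∀ tok ∈ PySem.Chars.split₀.go t.toList [] [],
      (if tok.length ≤ 1 then false else (tok.drop 1).any PySem.Chars.isupper) = pvPtok tok :=
    fun tok _ => pvPtok_guard tok
  rw [PySem.List.any_congr_mem h1, pvIc_go]
  simp [pvPc]

-- text.count("!") for a single-character needle is a per-character count
lemma pvCount_go_single (c : Char) (s : List Char) (acc : Nat) :
    PySem.Chars.count.go [c] s.length s acc = acc + s.countP (· == c) := by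
  induction s generalizing acc with
  | nil => rw [PySem.Chars.count.go.eq_def]; simp
  | cons a t ih =>
    rw [PySem.Chars.count.go.eq_def]
    simp only [List.length_cons]
    by_cases h : (List.isPrefixOf [c] (a :: t))
    · have hc : (a == c) = true := by
        simp only [List.isPrefixOf, Bool.and_true] at h
        rw [BEq.comm] at h; exact h
      simp only [h, if_true, List.drop_succ_cons, List.drop_zero, List.length_nil]
      rw [ih]
      simp [hc]
      omega
    · have hc : (a == c) = false := by
        simp only [List.isPrefixOf, Bool.and_true] at h
        rw [BEq.comm] at h; simpa using h
      simp only [h]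
      rw [ih]
      simp [hc]

lemma pvCount_single (c : Char) (s : List Char) :
    PySem.Chars.count s [c] = s.countP (· == c) := by
  rw [PySem.Chars.count]
  simp [pvCount_go_single]

lemma pvShouty_iff (t : String) :
    pvIsShouty t = true ↔ ((t.toList.countP PySem.Chars.isalpha : Int) ≠ 0 ∧
      10 * (t.toList.countP (fun c => PySem.Chars.isalpha c && PySem.Chars.isupper c) : Int) ≥
        3 * (t.toList.countP PySem.Chars.isalpha : Int)) := by
  rw [pvIsShouty]
  have hlen : (t.toList.filter PySem.Chars.isalpha).length = t.toList.countP PySem.Chars.isalpha :=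
    List.countP_eq_length_filter.symm
  have hcc : (t.toList.filter PySem.Chars.isalpha).countP PySem.Chars.isupper
      = t.toList.countP (fun c => PySem.Chars.isalpha c && PySem.Chars.isupper c) := by
    rw [List.countP_filter]
    exact List.countP_congr (fun c _ => by rw [Bool.and_comm])
  by_cases h : (t.toList.filter PySem.Chars.isalpha).isEmpty
  · have h0 : t.toList.countP PySem.Chars.isalpha = 0 := by
      rw [← hlen, List.isEmpty_iff.mp h]; rfl
    simp [h, h0]
  · have h0 : t.toList.countP PySem.Chars.isalpha ≠ 0 := by
      rw [← hlen]
      simpa [List.isEmpty_iff, List.length_eq_zero_iff] using h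
    have hfalse : (t.toList.filter PySem.Chars.isalpha).isEmpty = false := by simpa using h
    rw [hfalse]
    simp only [Bool.false_eq_true, if_false, decide_eq_true_iff, hcc, hlen]
    constructor
    · intro hge; exact ⟨by exact_mod_cast h0, hge⟩
    · intro hge; exact hge.2

lemma pvExcl_iff (t : String) :
    pvManyExclamations t = true ↔ ((t.toList.countP (· == '!') : Int) ≥ 2) := by
  rw [pvManyExclamations, decide_eq_true_iff, pvCount_single]
  omega

lemma pvQuest_iff (t : String) :
    pvManyQuestions t = true ↔ ((t.toList.countP (fun c => !(c == '!') && (c == '?')) : Int) ≥ 2) := by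
  rw [pvManyQuestions, decide_eq_true_iff, pvCount_single]
  have hq : t.toList.countP (fun c => !(c == '!') && (c == '?')) = t.toList.countP (· == '?') :=
    List.countP_congr (fun c _ => by
      by_cases h : c = '?'
      · subst h; decide
      · simp [h])
  rw [hq]
  omega

lemma pvProcess_eq (t : String) :
    (let markers : List (List Char) :=
      [if pvHasInnerUppercase t then "<INNER_CAP_1>".toList else "<INNER_CAP_0>".toList]
     let markers := if pvIsShouty t then markers ++ ["<SHOUTY>".toList] else markers
     let markers := if pvManyExclamations t then markers ++ ["<MANY_EXCL>".toList] else markers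
     let markers := if pvManyQuestions t then markers ++ ["<MANY_QUEST>".toList] else markers
     if markers.isEmpty then t
     else String.ofList (t.toList ++ [' '] ++ PySem.Chars.join [' '] markers)) = pvProcess t := by
  rw [pvProcess]
  simp only [pvScan_eq, zero_add]
  rw [← pvHasInner_eq]
  simp only [pvShouty_iff, pvExcl_iff, pvQuest_iff]
  split_ifs <;> simp_all

-- ===== VERDICT (by name: the statement is the Claim_ definition above) =====
theorem augment_texts_spec : Claim_equal_augment_texts := by
  intro texts _
  show _ = _
  unfold augment_texts augment_texts_alt
  rw [PySem.List.foldl_append_singleton_eq_map]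
  simp only [List.nil_append]
  exact List.map_congr_left (fun t _ => pvProcess_eq t)
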